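-- pv_equiv track=rewrite | github.com/ripclass/trdrhub.com | apps/api/app/services/validation/day1_retrieval_guard.py | _anchor_hits
-- ===== SOURCE A (Python) =====
-- from typing import Dict, List, Optional, Tuple
--
-- def _anchor_hits(text: str, aliases: List[str]) -> int:
--     if not text or not aliases:
--         return 0
--     lowered = text.lower()
--     hits = 0
--     for alias in aliases:
--         if alias and alias in lowered:
--             hits += 1
--     return hits
-- ===== SOURCE B (Python) =====
-- def _anchor_hits(text, aliases):
--     lowered = text.lower()
--     counts = {}
--     for a in aliases:
--         counts[a] = counts.get(a, 0) + 1
--     total = 0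
--     for a, c in counts.items():
--         if a and a in lowered:
--             total += c
--     return total
-- ===== Notes on version B (the rewrite author's own statement) =====
-- stated objective: alternative
-- what changed: B first builds a frequency table of the aliases and then runs the substring test once per DISTINCT alias, summing multiplicities, instead of searching the text once per list entry; it also drops A's early-return guard.
import Mathlib
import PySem

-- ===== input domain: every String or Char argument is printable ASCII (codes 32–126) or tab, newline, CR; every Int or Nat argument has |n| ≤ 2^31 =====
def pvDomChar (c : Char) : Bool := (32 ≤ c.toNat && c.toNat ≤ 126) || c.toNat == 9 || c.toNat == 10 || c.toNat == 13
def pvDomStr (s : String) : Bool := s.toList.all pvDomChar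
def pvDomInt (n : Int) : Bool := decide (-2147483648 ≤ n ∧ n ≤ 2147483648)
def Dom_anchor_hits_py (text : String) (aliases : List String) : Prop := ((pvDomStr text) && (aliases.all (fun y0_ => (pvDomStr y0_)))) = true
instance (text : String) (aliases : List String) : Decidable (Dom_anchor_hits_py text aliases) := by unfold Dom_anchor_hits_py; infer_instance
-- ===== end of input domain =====

-- B groups the aliases with a frequency table first and tests each DISTINCT alias once (alternative decomposition; same return value).

-- ===== PORT A =====
-- literal port of A: early return on empty text/aliases, then one substring test per list entry
def anchor_hits_py (text : String) (aliases : List String) : Int :=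
  if text = "" ∨ aliases = [] then 0
  else
    let lowered := PySem.Str.lower text
    aliases.foldl (fun hits alias_ =>
      if alias_ ≠ "" ∧ PySem.Str.isIn alias_ lowered = true then hits + 1 else hits) 0

-- ===== PORT B =====
-- literal port of B: counts[a] = counts.get(a, 0) + 1, then one pass over counts.items()
def anchor_hits_py_alt (text : String) (aliases : List String) : Int :=
  let lowered := PySem.Str.lower text
  let counts : PySem.Dict String Int :=
    aliases.foldl (fun d a => d.insert a (d.getD a 0 + 1)) PySem.Dict.empty
  counts.items.foldl (fun total p =>
    if p.1 ≠ "" ∧ PySem.Str.isIn p.1 lowered = true then total + p.2 else total) 0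

-- ===== PRECONDITION & SPEC =====
def Spec_anchor_hits_py (text : String) (aliases : List String) (out : Int) : Prop := out = anchor_hits_py_alt text aliases
instance (text : String) (aliases : List String) (out : Int) : Decidable (Spec_anchor_hits_py text aliases out) := by unfold Spec_anchor_hits_py; infer_instance

-- ===== CLAIM (what is proved, stated in full; the proofs are below) =====
def Claim_equal_anchor_hits_py : Prop := ∀ (text : String) (aliases : List String), Dom_anchor_hits_py text aliases → Spec_anchor_hits_py text aliases (anchor_hits_py text aliases)

-- ===== LEMMAS AND PROOFS =====

-- the common predicate both programs test an alias with
def pvHitP (lowered : String) (a : String) : Bool :=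
  decide (a ≠ "" ∧ PySem.Str.isIn a lowered = true)

-- B's result is the hit count of the multiset of aliases
theorem alt_eq_countP (text : String) (aliases : List String) :
    anchor_hits_py_alt text aliases
      = (aliases.countP (pvHitP (PySem.Str.lower text)) : Int) := by
  unfold anchor_hits_py_alt
  rw [PySem.Dict.foldl_insert_getD_add_one_eq_counter]
  simp only [PySem.Dict.items_counter, PySem.List.foldl_ite_eq_foldl_filter, List.filter_map]
  rw [PySem.List.foldl_add (g := fun p : String × Int => p.2), List.map_map]
  have hperm : ((PySem.Set.ofList aliases).filter
        (fun k => pvHitP (PySem.Str.lower text) k)).Perm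
      (aliases.dedup.filter (fun k => pvHitP (PySem.Str.lower text) k)) := by
    refine List.Perm.filter _ ?_
    rw [List.perm_ext_iff_of_nodup (PySem.Set.nodup_ofList aliases) aliases.nodup_dedup]
    intro a
    simp [PySem.Set.mem_ofList, List.mem_dedup]
  have := List.Perm.map (fun k => ((aliases.count k : Nat) : Int)) hperm
  have hsum := this.sum_eq
  simp only [Function.comp_def, pvHitP] at *
  rw [hsum,
    show (fun k => ((aliases.count k : Nat) : Int))
        = (Nat.cast : Nat → Int) ∘ (fun k => aliases.count k) from rfl,
    ← List.map_map, ← Nat.cast_list_sum, List.sum_map_count_dedup_filter_eq_countP, zero_add]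
  rfl

-- no alias hits the empty text (only "" is a substring of "", and "" is excluded)
theorem countP_empty_text (aliases : List String) :
    aliases.countP (pvHitP (PySem.Str.lower "")) = 0 := by
  rw [List.countP_eq_zero]
  intro a _
  simp only [pvHitP, decide_eq_true_eq, not_and]
  intro ha hin
  have h1 : a.toList <:+: PySem.Chars.lower "".toList :=
    (PySem.Chars.isIn_iff_infix _ _).mp (by simpa using hin)
  have h2 : a.toList = [] := List.eq_nil_of_infix_nil (by simpa [PySem.Chars.lower] using h1)
  exact ha (by cases a; simp_all)

-- ===== VERDICT (by name: the statement is the Claim_ definition above) =====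
theorem anchor_hits_py_spec : Claim_equal_anchor_hits_py := by
  intro text aliases _
  unfold Spec_anchor_hits_py
  rw [alt_eq_countP]
  unfold anchor_hits_py
  split_ifs with h
  · rcases h with h | h
    · subst h; rw [countP_empty_text]; simp
    · subst h; simp
  · rw [PySem.List.foldl_ite_add_one]
    norm_num
    apply List.countP_congr
    intro x _
    simp [pvHitP, pysem]
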